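-- pv_equiv track=rewrite | github.com/Gasskin/Investment | scripts/build_snapshot.py | _shift_month
-- ===== SOURCE A (Python) =====
-- def _shift_month(y: int, m: int, delta: int) -> tuple[int, int]:
--     m += delta
--     while m > 12:
--         y += 1
--         m -= 12
--     while m < 1:
--         y -= 1
--         m += 12
--     return y, m
-- ===== SOURCE B (Python) =====
-- def _shift_month(y: int, m: int, delta: int) -> tuple[int, int]:
--     q, r = divmod(m + delta - 1, 12)
--     return y + q, r + 1
-- ===== Notes on version B (the rewrite author's own statement) =====
-- stated objective: faster
-- what changed: Replaced the two normalization while-loops (stepping 12 at a time, O(|delta|) iterations) with one closed-form divmod on the 0-based month, computing the year carry and month in O(1).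
import Mathlib
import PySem

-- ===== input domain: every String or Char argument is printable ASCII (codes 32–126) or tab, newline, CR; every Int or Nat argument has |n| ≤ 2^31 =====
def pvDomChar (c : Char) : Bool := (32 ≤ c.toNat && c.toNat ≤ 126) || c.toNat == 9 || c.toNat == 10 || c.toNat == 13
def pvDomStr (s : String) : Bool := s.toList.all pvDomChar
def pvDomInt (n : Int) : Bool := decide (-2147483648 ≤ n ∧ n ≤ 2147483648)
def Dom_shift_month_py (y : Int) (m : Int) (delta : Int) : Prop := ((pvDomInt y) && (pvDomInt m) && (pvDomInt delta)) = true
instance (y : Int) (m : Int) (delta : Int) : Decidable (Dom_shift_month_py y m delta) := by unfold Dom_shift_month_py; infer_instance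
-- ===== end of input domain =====

-- B replaces A's two normalization while-loops with one closed-form divmod (simpler, O(1)).

-- ===== PORT A =====
-- while m > 12: y += 1; m -= 12
def shiftLoopUp (y m : Int) : Int × Int :=
  if h : m > 12 then shiftLoopUp (y + 1) (m - 12) else (y, m)
termination_by m.toNat
decreasing_by omega

-- while m < 1: y -= 1; m += 12
def shiftLoopDown (y m : Int) : Int × Int :=
  if h : m < 1 then shiftLoopDown (y - 1) (m + 12) else (y, m)
termination_by (1 - m).toNat
decreasing_by omega

def shift_month_py (y : Int) (m : Int) (delta : Int) : Int × Int :=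
  let m := m + delta
  let p := shiftLoopUp y m
  let q := shiftLoopDown p.1 p.2
  q

-- ===== PORT B =====
def shift_month_py_alt (y : Int) (m : Int) (delta : Int) : Int × Int :=
  let q := PySem.Int.floordiv (m + delta - 1) 12
  let r := PySem.Int.mod (m + delta - 1) 12
  (y + q, r + 1)

-- ===== PRECONDITION & SPEC =====
def Spec_shift_month_py (y : Int) (m : Int) (delta : Int) (out : Int × Int) : Prop := out = shift_month_py_alt y m delta
instance (y : Int) (m : Int) (delta : Int) (out : Int × Int) : Decidable (Spec_shift_month_py y m delta out) := by unfold Spec_shift_month_py; infer_instance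

-- ===== CLAIM (what is proved, stated in full; the proofs are below) =====
def Claim_equal_shift_month_py : Prop := ∀ (y : Int) (m : Int) (delta : Int), Dom_shift_month_py y m delta → Spec_shift_month_py y m delta (shift_month_py y m delta)

-- ===== LEMMAS AND PROOFS =====

-- The up-loop preserves 12*y + m and stops with m ≤ 12, never decreasing m below min m 1.
theorem shiftLoopUp_inv (y m : Int) :
    12 * (shiftLoopUp y m).1 + (shiftLoopUp y m).2 = 12 * y + m ∧
    (shiftLoopUp y m).2 ≤ 12 ∧ min m 1 ≤ (shiftLoopUp y m).2 := by
  by_cases h : m > 12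
  · have ih := shiftLoopUp_inv (y + 1) (m - 12)
    rw [shiftLoopUp, dif_pos h]
    omega
  · rw [shiftLoopUp, dif_neg h]
    refine ⟨?_, ?_, ?_⟩ <;> simp <;> omega
termination_by m.toNat
decreasing_by omega

-- The down-loop preserves 12*y + m and stops with m ≥ 1, never raising m above max m 12.
theorem shiftLoopDown_inv (y m : Int) :
    12 * (shiftLoopDown y m).1 + (shiftLoopDown y m).2 = 12 * y + m ∧
    1 ≤ (shiftLoopDown y m).2 ∧ (shiftLoopDown y m).2 ≤ max m 12 := by
  by_cases h : m < 1
  · have ih := shiftLoopDown_inv (y - 1) (m + 12)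
    rw [shiftLoopDown, dif_pos h]
    omega
  · rw [shiftLoopDown, dif_neg h]
    refine ⟨?_, ?_, ?_⟩ <;> simp <;> omega
termination_by (1 - m).toNat
decreasing_by omega

-- ===== VERDICT (by name: the statement is the Claim_ definition above) =====
theorem shift_month_py_spec : Claim_equal_shift_month_py := by
  intro y m delta _
  unfold Spec_shift_month_py shift_month_py shift_month_py_alt
  simp only
  obtain ⟨h1, h2, h3⟩ := shiftLoopUp_inv y (m + delta)
  obtain ⟨h4, h5, h6⟩ := shiftLoopDown_inv (shiftLoopUp y (m + delta)).1 (shiftLoopUp y (m + delta)).2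
  have hfd : PySem.Int.floordiv (m + delta - 1) 12 = (m + delta - 1) / 12 :=
    PySem.Int.floordiv_eq_ediv_of_pos (by omega)
  have hmd : PySem.Int.mod (m + delta - 1) 12 = (m + delta - 1) % 12 :=
    PySem.Int.mod_eq_emod_of_pos (by omega)
  have he := Int.mul_ediv_add_emod (m + delta - 1) 12
  have h7 : 0 ≤ (m + delta - 1) % 12 := Int.emod_nonneg _ (by omega)
  have h8 : (m + delta - 1) % 12 < 12 := Int.emod_lt_of_pos _ (by omega)
  rw [hfd, hmd]
  apply Prod.ext <;> simp only <;> omega
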